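-- pv_equiv track=rewrite | github.com/astOwOlfo/swe_bench_rl | apps_env/apps_env.py | strings_are_same_just_with_different_whitespaces
-- ===== SOURCE A (Python) =====
-- def strings_are_same_just_with_different_whitespaces(
--     string1: str, string2: str
-- ) -> bool:
--     lines1: list[str] = [
--         line.strip() for line in string1.splitlines() if line.strip() != ""
--     ]
--     lines2: list[str] = [
--         line.strip() for line in string2.splitlines() if line.strip() != ""
--     ]
--
--     fields1: list[list[str]] = [line.split() for line in lines1]
--     fields2: list[list[str]] = [line.split() for line in lines2]
--
--     fields1 = tuple(tuple(fields) for fields in fields1)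
--     fields2 = tuple(tuple(fields) for fields in fields2)
--
--     return fields1 == fields2
-- ===== SOURCE B (Python) =====
-- def _canonical_tokens(s: str) -> list:
--     out = []
--     line = []
--     cur = []
--     i = 0
--     n = len(s)
--     while i < n:
--         c = s[i]
--         i += 1
--         if c == '\r' and i < n and s[i] == '\n':
--             i += 1
--             c = '\n'
--         if c == '\n' or c == '\r':
--             if cur:
--                 line.append(''.join(cur))
--                 cur = []
--             if line:
--                 out.append(line)
--                 line = []
--         elif c == ' ' or c == '\t':
--             if cur:
--                 line.append(''.join(cur))
--                 cur = []
--         else: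
--             cur.append(c)
--     if cur:
--         line.append(''.join(cur))
--     if line:
--         out.append(line)
--     return out
--
--
-- def strings_are_same_just_with_different_whitespaces(string1: str, string2: str) -> bool:
--     return _canonical_tokens(string1) == _canonical_tokens(string2)
-- ===== Notes on version B (the rewrite author's own statement) =====
-- stated objective: alternative
-- what changed: Replaced the splitlines/strip/split pipeline with nested tuple comparison by a single character-level scan that builds each string's canonical token structure (tokens per non-blank line) in one pass with a small state machine.
import Mathlib
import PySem

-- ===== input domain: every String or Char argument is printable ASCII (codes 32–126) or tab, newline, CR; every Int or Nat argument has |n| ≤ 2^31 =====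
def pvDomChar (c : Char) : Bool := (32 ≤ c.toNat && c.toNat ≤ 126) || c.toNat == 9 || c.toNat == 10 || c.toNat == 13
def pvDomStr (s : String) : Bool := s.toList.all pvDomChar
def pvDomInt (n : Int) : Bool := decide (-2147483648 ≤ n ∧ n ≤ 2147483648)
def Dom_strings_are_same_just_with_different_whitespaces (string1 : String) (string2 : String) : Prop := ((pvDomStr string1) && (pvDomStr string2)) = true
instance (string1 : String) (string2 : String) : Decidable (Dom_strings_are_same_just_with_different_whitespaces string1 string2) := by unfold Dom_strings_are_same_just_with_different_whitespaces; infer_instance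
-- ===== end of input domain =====

-- B replaces A's splitlines/strip/split pipeline by a single character-level scan building each
-- string's canonical token structure (tokens per non-blank line) in one pass (objective: alternative).

-- ===== PORT A =====
def strings_are_same_just_with_different_whitespaces (string1 : String) (string2 : String) : Bool :=
  let lines1 : List String :=
    ((PySem.Str.splitlines string1).filter (fun line => PySem.Str.strip line != "")).map
      (fun line => PySem.Str.strip line)
  let lines2 : List String :=
    ((PySem.Str.splitlines string2).filter (fun line => PySem.Str.strip line != "")).map
      (fun line => PySem.Str.strip line)
  let fields1 : List (List String) := lines1.map (fun line => PySem.Str.split₀ line)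
  let fields2 : List (List String) := lines2.map (fun line => PySem.Str.split₀ line)
  fields1 == fields2

-- ===== PORT B =====
-- transliteration of _canonical_tokens's loop: cur/line/out are the Python lists, accumulated
-- in reverse (Python appends at the end) and reversed when flushed/returned
def pvCanonGo : List Char → List Char → List String → List (List String) → List (List String)
  | [], cur, line, out =>
    let line' := if cur.isEmpty then line else String.ofList cur.reverse :: line
    if line'.isEmpty then out.reverse else (line'.reverse :: out).reverse
  | '\r' :: '\n' :: rest, cur, line, out =>
    let line' := if cur.isEmpty then line else String.ofList cur.reverse :: line
    pvCanonGo rest [] [] (if line'.isEmpty then out else line'.reverse :: out)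
  | c :: rest, cur, line, out =>
    if c == '\n' || c == '\r' then
      let line' := if cur.isEmpty then line else String.ofList cur.reverse :: line
      pvCanonGo rest [] [] (if line'.isEmpty then out else line'.reverse :: out)
    else if c == ' ' || c == '\t' then
      pvCanonGo rest [] (if cur.isEmpty then line else String.ofList cur.reverse :: line) out
    else
      pvCanonGo rest (c :: cur) line out

def pvCanon (s : String) : List (List String) := pvCanonGo s.toList [] [] []

def strings_are_same_just_with_different_whitespaces_alt (string1 : String) (string2 : String) : Bool :=
  pvCanon string1 == pvCanon string2

-- ===== PRECONDITION & SPEC =====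
def Spec_strings_are_same_just_with_different_whitespaces (string1 : String) (string2 : String) (out : Bool) : Prop := out = strings_are_same_just_with_different_whitespaces_alt string1 string2
instance (string1 : String) (string2 : String) (out : Bool) : Decidable (Spec_strings_are_same_just_with_different_whitespaces string1 string2 out) := by unfold Spec_strings_are_same_just_with_different_whitespaces; infer_instance

-- ===== CLAIM (what is proved, stated in full; the proofs are below) =====
def Claim_equal_strings_are_same_just_with_different_whitespaces : Prop := ∀ (string1 : String) (string2 : String), Dom_strings_are_same_just_with_different_whitespaces string1 string2 → Spec_strings_are_same_just_with_different_whitespaces string1 string2 (strings_are_same_just_with_different_whitespaces string1 string2)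

-- ===== LEMMAS AND PROOFS =====

-- ---- char-class facts on the domain ----
theorem pv_beq_toNat (c d : Char) : (c == d) = decide (c.toNat = d.toNat) := by
  rcases c with ⟨v, hv⟩; rcases d with ⟨w, hw⟩
  simp [Char.toNat, BEq.beq, Char.ext_iff, ← UInt32.toNat_inj]

-- the break test splitlines uses, named so it can be cited
def pvIsB (c : Char) : Bool :=
  have n := c.toNat
  decide (n = 10) || decide (n = 13) || decide (n = 11) || decide (n = 12) || decide (n = 28) ||
    decide (n = 29) || decide (n = 30) || decide (n = 133) || decide (n = 8232) || decide (n = 8233)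

theorem splitlines_eq_go (l : List Char) :
    PySem.Chars.splitlines l = PySem.Chars.splitlines.go pvIsB l [] [] := rfl

theorem dom_isB (c : Char) (h : pvDomChar c = true) : pvIsB c = (c == '\n' || c == '\r') := by
  have hn : (32 ≤ c.toNat ∧ c.toNat ≤ 126) ∨ c.toNat = 9 ∨ c.toNat = 10 ∨ c.toNat = 13 := by
    have := h; simp [pvDomChar] at this; tauto
  rw [Bool.eq_iff_iff]
  simp only [pvIsB, pv_beq_toNat, Bool.or_eq_true, decide_eq_true_eq]
  have h10 : ('\n').toNat = 10 := rfl
  have h13 : ('\r').toNat = 13 := rfl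
  rw [h10, h13]
  omega

theorem dom_isspace (c : Char) (h : pvDomChar c = true) :
    PySem.Chars.isspace c = (c == ' ' || c == '\t' || c == '\n' || c == '\r') := by
  have hn : (32 ≤ c.toNat ∧ c.toNat ≤ 126) ∨ c.toNat = 9 ∨ c.toNat = 10 ∨ c.toNat = 13 := by
    have := h; simp [pvDomChar] at this; tauto
  rw [Bool.eq_iff_iff]
  simp only [PySem.Chars.isspace, pv_beq_toNat, Bool.or_eq_true, Bool.and_eq_true, decide_eq_true_eq]
  have h32 : (' ').toNat = 32 := rfl
  have h9 : ('\t').toNat = 9 := rfl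
  have h10 : ('\n').toNat = 10 := rfl
  have h13 : ('\r').toNat = 13 := rfl
  rw [h32, h9, h10, h13]
  omega

-- ---- step lemmas for splitlines.go ----
theorem slgo_nil (cur : List Char) (acc : List (List Char)) (isB : Char → Bool) :
    PySem.Chars.splitlines.go isB [] cur acc =
      if cur.isEmpty then acc.reverse else (cur.reverse :: acc).reverse := by
  rw [PySem.Chars.splitlines.go.eq_def]

theorem slgo_crlf (rest cur : List Char) (acc : List (List Char)) (isB : Char → Bool) :
    PySem.Chars.splitlines.go isB ('\r'::'\n'::rest) cur acc =
      PySem.Chars.splitlines.go isB rest [] (cur.reverse :: acc) := by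
  rw [PySem.Chars.splitlines.go.eq_def]
  split
  · simp_all
  · simp_all
  · rename_i hno heq
    injection heq with h1 h2
    exact absurd h2.symm (hno rest h1.symm)

theorem slgo_break (rest cur : List Char) (acc : List (List Char)) (isB : Char → Bool) (c : Char)
    (h : isB c = true) (hnot : ¬ (c = '\r' ∧ rest.head? = some '\n')) :
    PySem.Chars.splitlines.go isB (c::rest) cur acc =
      PySem.Chars.splitlines.go isB rest [] (cur.reverse :: acc) := by
  rw [PySem.Chars.splitlines.go.eq_def]
  split <;> simp_all [List.head?]

theorem slgo_chr (rest cur : List Char) (acc : List (List Char)) (isB : Char → Bool) (c : Char)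
    (h : isB c = false) (hr : c ≠ '\r') :
    PySem.Chars.splitlines.go isB (c::rest) cur acc =
      PySem.Chars.splitlines.go isB rest (c::cur) acc := by
  rw [PySem.Chars.splitlines.go.eq_def]
  split <;> simp_all

-- ---- step lemmas for split₀.go ----
theorem sp_nil (cur : List Char) (acc : List (List Char)) :
    PySem.Chars.split₀.go [] cur acc = if cur.isEmpty then acc.reverse else (cur.reverse :: acc).reverse := by
  rw [PySem.Chars.split₀.go.eq_def]

theorem sp_ws (rest cur : List Char) (acc : List (List Char)) (c : Char) (h : PySem.Chars.isspace c = true) :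
    PySem.Chars.split₀.go (c::rest) cur acc =
      if cur.isEmpty then PySem.Chars.split₀.go rest [] acc
      else PySem.Chars.split₀.go rest [] (cur.reverse :: acc) := by
  rw [PySem.Chars.split₀.go.eq_def]; simp [h]

theorem sp_chr (rest cur : List Char) (acc : List (List Char)) (c : Char) (h : PySem.Chars.isspace c = false) :
    PySem.Chars.split₀.go (c::rest) cur acc = PySem.Chars.split₀.go rest (c::cur) acc := by
  rw [PySem.Chars.split₀.go.eq_def]; simp [h]

-- ---- split₀ absorbs strip ----
theorem sp_all_ws (ws : List Char) (hws : ∀ c ∈ ws, PySem.Chars.isspace c = true)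
    (cur : List Char) (acc : List (List Char)) :
    PySem.Chars.split₀.go ws cur acc = PySem.Chars.split₀.go [] cur acc := by
  induction ws generalizing cur acc with
  | nil => rfl
  | cons c w ih =>
    rw [sp_ws _ _ _ _ (hws c (by simp))]
    by_cases hc : cur.isEmpty
    · rw [if_pos hc, ih (fun d hd => hws d (by simp [hd])) [] acc, sp_nil, sp_nil]
      simp [hc]
    · rw [if_neg hc, ih (fun d hd => hws d (by simp [hd])) [] (cur.reverse :: acc), sp_nil, sp_nil]
      simp [hc]

theorem sp_trailing (x ws : List Char) (hws : ∀ c ∈ ws, PySem.Chars.isspace c = true)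
    (cur : List Char) (acc : List (List Char)) :
    PySem.Chars.split₀.go (x ++ ws) cur acc = PySem.Chars.split₀.go x cur acc := by
  induction x generalizing cur acc with
  | nil => simpa using sp_all_ws ws hws cur acc
  | cons c r ih =>
    by_cases hc : PySem.Chars.isspace c = true
    · rw [List.cons_append, sp_ws _ _ _ _ hc, sp_ws _ _ _ _ hc]
      by_cases h0 : cur.isEmpty <;> simp [h0, ih]
    · rw [List.cons_append, sp_chr _ _ _ _ (by simpa using hc), sp_chr _ _ _ _ (by simpa using hc), ih]

theorem sp_leading (x : List Char) (acc : List (List Char)) :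
    PySem.Chars.split₀.go (x.dropWhile PySem.Chars.isspace) [] acc = PySem.Chars.split₀.go x [] acc := by
  induction x generalizing acc with
  | nil => rfl
  | cons c r ih =>
    by_cases hc : PySem.Chars.isspace c = true
    · rw [List.dropWhile_cons_of_pos (by simpa using hc), sp_ws _ _ _ _ hc]
      simpa using ih acc
    · rw [List.dropWhile_cons_of_neg (by simpa using hc)]

theorem split₀_strip (x : List Char) :
    PySem.Chars.split₀ (PySem.Chars.strip x) = PySem.Chars.split₀ x := by
  have hr : ∀ y : List Char, PySem.Chars.split₀ (PySem.Chars.rstrip y) = PySem.Chars.split₀ y := by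
    intro y
    have hdecomp : y = PySem.Chars.rstrip y ++ (y.reverse.takeWhile PySem.Chars.isspace).reverse := by
      have h1 := List.takeWhile_append_dropWhile (p := PySem.Chars.isspace) (l := y.reverse)
      simp only [PySem.Chars.rstrip, ← List.reverse_append, h1, List.reverse_reverse]
    conv_rhs => rw [hdecomp]
    unfold PySem.Chars.split₀
    rw [sp_trailing _ _ (fun d hd => List.mem_takeWhile_imp (by simpa using hd))]
  have hl : PySem.Chars.split₀ (PySem.Chars.lstrip x) = PySem.Chars.split₀ x := by
    unfold PySem.Chars.split₀ PySem.Chars.lstrip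
    exact sp_leading x []
  rw [PySem.Chars.strip, hr, hl]

theorem sp_ne_nil (x cur : List Char) (acc : List (List Char)) (h : cur ≠ [] ∨ acc ≠ []) :
    PySem.Chars.split₀.go x cur acc ≠ [] := by
  induction x generalizing cur acc with
  | nil =>
    rw [sp_nil]
    by_cases hc : cur.isEmpty
    · have : acc ≠ [] := by
        rcases h with h | h
        · exact absurd (by simpa using hc) h
        · exact h
      simp [hc, this]
    · simp [hc]
  | cons c r ih =>
    by_cases hc : PySem.Chars.isspace c = true
    · rw [sp_ws _ _ _ _ hc]
      by_cases h0 : cur.isEmpty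
      · have hacc : acc ≠ [] := by
          rcases h with h | h
          · exact absurd (by simpa using h0) h
          · exact h
        rw [if_pos h0]
        exact ih _ _ (Or.inr hacc)
      · rw [if_neg h0]
        exact ih _ _ (Or.inr (by simp))
    · rw [sp_chr _ _ _ _ (by simpa using hc)]
      exact ih _ _ (Or.inl (by simp))

theorem split₀_eq_nil_iff (x : List Char) :
    PySem.Chars.split₀ x = [] ↔ ∀ c ∈ x, PySem.Chars.isspace c = true := by
  induction x with
  | nil => simp [PySem.Chars.split₀, sp_nil]
  | cons c r ih =>
    unfold PySem.Chars.split₀ at *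
    by_cases hc : PySem.Chars.isspace c = true
    · rw [sp_ws _ _ _ _ hc]
      simp only [List.isEmpty_nil, if_true, List.mem_cons]
      constructor
      · intro h d hd
        rcases hd with rfl | hd
        · exact hc
        · exact (ih.1 h) d hd
      · intro h
        exact ih.2 (fun d hd => h d (Or.inr hd))
    · rw [sp_chr _ _ _ _ (by simpa using hc)]
      constructor
      · intro h
        exact absurd h (sp_ne_nil _ _ _ (Or.inl (by simp)))
      · intro h
        exact absurd (h c (by simp)) hc

theorem strip_eq_nil_iff (x : List Char) :
    PySem.Chars.strip x = [] ↔ ∀ c ∈ x, PySem.Chars.isspace c = true := by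
  constructor
  · intro h d hd
    have h2 : List.dropWhile PySem.Chars.isspace (PySem.Chars.lstrip x).reverse = [] := by
      have h3 := h
      rw [PySem.Chars.strip, PySem.Chars.rstrip, List.reverse_eq_nil_iff] at h3
      exact h3
    have hls : ∀ e ∈ PySem.Chars.lstrip x, PySem.Chars.isspace e = true := by
      intro e he
      rw [List.dropWhile_eq_nil_iff] at h2
      exact h2 e (by simpa using he)
    have hx : d ∈ List.takeWhile PySem.Chars.isspace x ∨ d ∈ PySem.Chars.lstrip x := by
      rw [PySem.Chars.lstrip, ← List.mem_append, List.takeWhile_append_dropWhile]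
      exact hd
    rcases hx with h1 | h1
    · exact List.mem_takeWhile_imp h1
    · exact hls d h1
  · intro h
    have hl : PySem.Chars.lstrip x = [] := by
      rw [PySem.Chars.lstrip, List.dropWhile_eq_nil_iff]
      exact h
    simp [PySem.Chars.strip, hl, PySem.Chars.rstrip]

-- ---- decomposition of the input at its first line break ----
def pvFB : List Char → Option (List Char × List Char)
  | [] => none
  | '\r' :: '\n' :: r => some ([], r)
  | c :: r =>
    if c == '\n' || c == '\r' then some ([], r)
    else match pvFB r with
         | none => none
         | some (a, r') => some (c :: a, r')

def pvEmitC (t : List (List Char)) : List (List (List Char)) := if t = [] then [] else [t]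
def pvEmit (t : List String) : List (List String) := if t = [] then [] else [t]

-- what A's pipeline computes, at the character level
def pvPipe (l : List Char) : List (List (List Char)) :=
  ((PySem.Chars.splitlines l).map PySem.Chars.split₀).filter (fun t => !t.isEmpty)

-- step lemmas for pvFB
theorem pvFB_nil : pvFB [] = none := rfl

theorem pvFB_crlf (r : List Char) : pvFB ('\r'::'\n'::r) = some ([], r) := by
  rw [pvFB.eq_def]
  split
  · simp_all
  · simp_all
  · rename_i hno heq
    injection heq with h1 h2
    exact absurd h2.symm (hno r h1.symm)

theorem pvFB_cons (c : Char) (r : List Char) (hnot : ¬ (c = '\r' ∧ r.head? = some '\n')) :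
    pvFB (c::r) = if c == '\n' || c == '\r' then some ([], r)
      else (match pvFB r with
            | none => none
            | some (a, r') => some (c :: a, r')) := by
  rw [pvFB.eq_def]
  split <;> simp_all [List.head?]

theorem pvSL_aux (isB : Char → Bool) :
    ∀ (n : ℕ) (l : List Char), l.length ≤ n → (∀ c ∈ l, isB c = (c == '\n' || c == '\r')) → ∀ cur acc,
    PySem.Chars.splitlines.go isB l cur acc = acc.reverse ++
      (match pvFB l with
       | none => if cur.isEmpty && l.isEmpty then [] else [cur.reverse ++ l]
       | some (a, r) => (cur.reverse ++ a) :: PySem.Chars.splitlines.go isB r [] []) := by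
  intro n
  induction n with
  | zero =>
    intro l hl hB cur acc
    cases l with
    | nil =>
      rw [slgo_nil, pvFB_nil]
      by_cases hc : cur.isEmpty <;> simp [hc]
    | cons c r => simp at hl
  | succ n ih =>
    intro l hl hB cur acc
    cases l with
    | nil =>
      rw [slgo_nil, pvFB_nil]
      by_cases hc : cur.isEmpty <;> simp [hc]
    | cons c r =>
      by_cases hcr : c = '\r' ∧ r.head? = some '\n'
      · obtain ⟨rfl, hr⟩ := hcr
        obtain ⟨r2, rfl⟩ : ∃ r2, r = '\n'::r2 := by
          cases r with
          | nil => simp at hr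
          | cons x xs => exact ⟨xs, by simpa using congrArg (fun o => o.getD ' ' :: xs) hr⟩
        rw [slgo_crlf, pvFB_crlf]
        have hlen : r2.length ≤ n := by simp at hl; omega
        have hB2 : ∀ d ∈ r2, isB d = (d == '\n' || d == '\r') := fun d hd => hB d (by simp [hd])
        have h1 := ih r2 hlen hB2 [] (cur.reverse :: acc)
        have h2 := ih r2 hlen hB2 [] []
        simp [h1, h2]
      · by_cases hb : isB c = true
        · rw [slgo_break _ _ _ _ _ hb hcr, pvFB_cons c r hcr]
          have hcb : (c == '\n' || c == '\r') = true := by rw [← hB c (by simp)]; exact hb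
          rw [if_pos hcb]
          have hlen : r.length ≤ n := by simp at hl; omega
          have hB2 : ∀ d ∈ r, isB d = (d == '\n' || d == '\r') := fun d hd => hB d (by simp [hd])
          have h1 := ih r hlen hB2 [] (cur.reverse :: acc)
          have h2 := ih r hlen hB2 [] []
          simp [h1, h2]
        · have hcb : (c == '\n' || c == '\r') = false := by
            rw [← hB c (by simp)]
            exact Bool.not_eq_true _ ▸ (by simpa using hb)
          have hcr' : c ≠ '\r' := by
            intro hrr
            subst hrr
            simp at hcb
          rw [slgo_chr _ _ _ _ _ (by simpa using hb) hcr', pvFB_cons c r hcr, if_neg (by simp [hcb])]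
          have hlen : r.length ≤ n := by simp at hl; omega
          have hB2 : ∀ d ∈ r, isB d = (d == '\n' || d == '\r') := fun d hd => hB d (by simp [hd])
          have h1 := ih r hlen hB2 (c :: cur) acc
          cases hfb : pvFB r with
          | none => simp [h1, hfb]
          | some ar =>
            obtain ⟨a, r'⟩ := ar
            simp [h1, hfb]

theorem pvSL (isB : Char → Bool) :
    ∀ l : List Char, (∀ c ∈ l, isB c = (c == '\n' || c == '\r')) → ∀ cur acc,
    PySem.Chars.splitlines.go isB l cur acc = acc.reverse ++
      (match pvFB l with
       | none => if cur.isEmpty && l.isEmpty then [] else [cur.reverse ++ l]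
       | some (a, r) => (cur.reverse ++ a) :: PySem.Chars.splitlines.go isB r [] []) :=
  fun l hB => pvSL_aux isB l.length l le_rfl hB

theorem pipe_decomp (l : List Char) (hd : l.all pvDomChar = true) :
    pvPipe l = (match pvFB l with
      | none => pvEmitC (PySem.Chars.split₀ l)
      | some (a, r) => pvEmitC (PySem.Chars.split₀ a) ++ pvPipe r) := by
  have hB : ∀ c ∈ l, pvIsB c = (c == '\n' || c == '\r') := by
    intro c hc
    exact dom_isB c (by rw [List.all_eq_true] at hd; exact hd c hc)
  have hsl := pvSL pvIsB l hB [] []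
  rw [pvPipe, splitlines_eq_go, hsl]
  cases hfb : pvFB l with
  | none =>
    have h0 : PySem.Chars.split₀ ([] : List Char) = [] := by
      rw [PySem.Chars.split₀, sp_nil]; simp
    by_cases hl : l = []
    · subst hl; simp [pvEmitC, h0]
    · by_cases hsp : PySem.Chars.split₀ l = []
      · simp [hl, hsp, pvEmitC]
      · simp [hl, hsp, pvEmitC]
  | some ar =>
    obtain ⟨a, r⟩ := ar
    simp only []
    rw [← splitlines_eq_go]
    by_cases hsp : PySem.Chars.split₀ a = []
    · simp [hsp, pvEmitC, pvPipe]
    · simp [hsp, pvEmitC, pvPipe]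

-- step lemmas for pvCanonGo
theorem cg_nil (cur : List Char) (line : List String) (out : List (List String)) :
    pvCanonGo [] cur line out =
      (let line' := if cur.isEmpty then line else String.ofList cur.reverse :: line
       if line'.isEmpty then out.reverse else (line'.reverse :: out).reverse) := rfl

theorem cg_crlf (rest cur : List Char) (line : List String) (out : List (List String)) :
    pvCanonGo ('\r'::'\n'::rest) cur line out =
      (let line' := if cur.isEmpty then line else String.ofList cur.reverse :: line
       pvCanonGo rest [] [] (if line'.isEmpty then out else line'.reverse :: out)) := by
  rw [pvCanonGo.eq_def]
  split
  · simp_all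
  · simp_all
  · rename_i hno heq
    injection heq with h1 h2
    exact absurd h2.symm (hno rest h1.symm)

theorem cg_cons (c : Char) (rest cur : List Char) (line : List String) (out : List (List String))
    (hnot : ¬ (c = '\r' ∧ rest.head? = some '\n')) :
    pvCanonGo (c::rest) cur line out =
      (if c == '\n' || c == '\r' then
        (let line' := if cur.isEmpty then line else String.ofList cur.reverse :: line
         pvCanonGo rest [] [] (if line'.isEmpty then out else line'.reverse :: out))
      else if c == ' ' || c == '\t' then
        pvCanonGo rest [] (if cur.isEmpty then line else String.ofList cur.reverse :: line) out
      else
        pvCanonGo rest (c :: cur) line out) := by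
  rw [pvCanonGo.eq_def]
  split <;> simp_all [List.head?]

-- a flushed token/line state, seen through split₀.go on the empty input
theorem flush_eq (cur : List Char) (line : List String) :
    (PySem.Chars.split₀.go [] cur (line.map String.toList)).map String.ofList
      = (if cur.isEmpty then line else String.ofList cur.reverse :: line).reverse := by
  rw [sp_nil]
  by_cases hc : cur.isEmpty <;> simp [hc, List.map_map, Function.comp_def]

theorem push_tok (cur : List Char) (line : List String) :
    (if cur.isEmpty then line else String.ofList cur.reverse :: line).map String.toList
      = if cur.isEmpty then line.map String.toList else cur.reverse :: line.map String.toList := by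
  by_cases hc : cur.isEmpty <;> simp [hc]

theorem pvMain_aux : ∀ (n : ℕ) (l : List Char), l.length ≤ n → l.all pvDomChar = true →
    ∀ cur line out,
    pvCanonGo l cur line out = out.reverse ++
      (match pvFB l with
       | none => pvEmit ((PySem.Chars.split₀.go l cur (line.map String.toList)).map String.ofList)
       | some (a, r) =>
           pvEmit ((PySem.Chars.split₀.go a cur (line.map String.toList)).map String.ofList) ++
             pvCanonGo r [] [] []) := by
  intro n
  induction n with
  | zero =>
    intro l hl hd cur line out
    cases l with
    | nil =>
      rw [cg_nil, pvFB_nil]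
      simp only [flush_eq, pvEmit, List.isEmpty_iff]
      by_cases hline : (if cur = ([] : List Char) then line else String.ofList cur.reverse :: line) = [] <;>
        simp [hline]
    | cons c r => simp at hl
  | succ n ih =>
    intro l hl hd cur line out
    cases l with
    | nil =>
      rw [cg_nil, pvFB_nil]
      simp only [flush_eq, pvEmit, List.isEmpty_iff]
      by_cases hline : (if cur = ([] : List Char) then line else String.ofList cur.reverse :: line) = [] <;>
        simp [hline]
    | cons c r =>
      have hd' : pvDomChar c = true ∧ r.all pvDomChar = true := by simpa using hd
      have hdc : pvDomChar c = true := hd'.1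
      have hdr : r.all pvDomChar = true := hd'.2
      by_cases hcr : c = '\r' ∧ r.head? = some '\n'
      · obtain ⟨rfl, hr⟩ := hcr
        obtain ⟨r2, rfl⟩ : ∃ r2, r = '\n'::r2 := by
          cases r with
          | nil => simp at hr
          | cons x xs => exact ⟨xs, by simpa using congrArg (fun o => o.getD ' ' :: xs) hr⟩
        have hdr2 : r2.all pvDomChar = true :=
          (by simpa using hdr : pvDomChar '\n' = true ∧ r2.all pvDomChar = true).2
        have hlen : r2.length ≤ n := by simp at hl; omega
        rw [cg_crlf, pvFB_crlf]
        have h1 := ih r2 hlen hdr2 [] [] (if (if cur.isEmpty then line else String.ofList cur.reverse :: line).isEmpty then out else (if cur.isEmpty then line else String.ofList cur.reverse :: line).reverse :: out)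
        have h2 := ih r2 hlen hdr2 [] [] []
        simp only [List.isEmpty_iff] at h1 ⊢
        by_cases hline : (if cur = ([] : List Char) then line else String.ofList cur.reverse :: line) = []
        · rw [if_pos hline] at h1
          simp [flush_eq, pvEmit, hline, h1, h2]
        · rw [if_neg hline] at h1
          simp [flush_eq, pvEmit, hline, h1, h2]
      · by_cases hb : (c == '\n' || c == '\r') = true
        · have hlen : r.length ≤ n := by simp at hl; omega
          rw [cg_cons c r cur line out hcr, if_pos hb, pvFB_cons c r hcr, if_pos hb]
          have h1 := ih r hlen hdr [] [] (if (if cur.isEmpty then line else String.ofList cur.reverse :: line).isEmpty then out else (if cur.isEmpty then line else String.ofList cur.reverse :: line).reverse :: out)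
          have h2 := ih r hlen hdr [] [] []
          simp only [List.isEmpty_iff] at h1 ⊢
          by_cases hline : (if cur = ([] : List Char) then line else String.ofList cur.reverse :: line) = []
          · rw [if_pos hline] at h1
            simp [flush_eq, pvEmit, hline, h1, h2]
          · rw [if_neg hline] at h1
            simp [flush_eq, pvEmit, hline, h1, h2]
        · have hlen : r.length ≤ n := by simp at hl; omega
          have hsp : PySem.Chars.isspace c = (c == ' ' || c == '\t') := by
            rw [dom_isspace c hdc]
            rcases Bool.or_eq_false_iff.1 (Bool.not_eq_true _ ▸ hb) with ⟨hn, hr'⟩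
            simp [hn, hr']
          have hb' : ¬((c == '\n' || c == '\r') = true) := hb
          rw [cg_cons c r cur line out hcr, if_neg hb', pvFB_cons c r hcr, if_neg hb']
          by_cases hw : (c == ' ' || c == '\t') = true
          · rw [if_pos hw]
            have h1 := ih r hlen hdr [] (if cur.isEmpty then line else String.ofList cur.reverse :: line) out
            cases hfb : pvFB r with
            | none =>
              simp only [hfb] at h1 ⊢
              rw [h1, sp_ws _ _ _ _ (by rw [hsp]; exact hw), push_tok]
              by_cases hc : cur.isEmpty <;> simp [hc]
            | some ar =>
              obtain ⟨a, r'⟩ := ar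
              simp only [hfb] at h1 ⊢
              rw [h1, sp_ws _ _ _ _ (by rw [hsp]; exact hw), push_tok]
              by_cases hc : cur.isEmpty <;> simp [hc]
          · rw [if_neg hw]
            have h1 := ih r hlen hdr (c :: cur) line out
            cases hfb : pvFB r with
            | none =>
              simp only [hfb] at h1 ⊢
              rw [h1, sp_chr _ _ _ _ (by rw [hsp]; simpa using hw)]
            | some ar =>
              obtain ⟨a, r'⟩ := ar
              simp only [hfb] at h1 ⊢
              rw [h1, sp_chr _ _ _ _ (by rw [hsp]; simpa using hw)]

theorem pvMain : ∀ l : List Char, l.all pvDomChar = true → ∀ cur line out,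
    pvCanonGo l cur line out = out.reverse ++
      (match pvFB l with
       | none => pvEmit ((PySem.Chars.split₀.go l cur (line.map String.toList)).map String.ofList)
       | some (a, r) =>
           pvEmit ((PySem.Chars.split₀.go a cur (line.map String.toList)).map String.ofList) ++
             pvCanonGo r [] [] []) :=
  fun l hd => pvMain_aux l.length l le_rfl hd

theorem pvFB_some : ∀ l a r, pvFB l = some (a, r) →
    r.length < l.length ∧ (l.all pvDomChar = true → r.all pvDomChar = true) := by
  intro l
  induction l with
  | nil => intro a r h; simp [pvFB_nil] at h
  | cons c r0 ih =>
    intro a r h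
    by_cases hcr : c = '\r' ∧ r0.head? = some '\n'
    · obtain ⟨rfl, hr⟩ := hcr
      obtain ⟨r2, rfl⟩ : ∃ r2, r0 = '\n'::r2 := by
        cases r0 with
        | nil => simp at hr
        | cons x xs => exact ⟨xs, by simpa using congrArg (fun o => o.getD ' ' :: xs) hr⟩
      rw [pvFB_crlf] at h
      injection h with h'
      injection h' with h1 h2
      subst h1; subst h2
      constructor
      · simp
      · intro hall
        simp only [List.all_cons, Bool.and_eq_true] at hall
        exact hall.2.2
    · rw [pvFB_cons c r0 hcr] at h
      by_cases hb : (c == '\n' || c == '\r') = true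
      · rw [if_pos hb] at h
        injection h with h'
        injection h' with h1 h2
        subst h1; subst h2
        constructor
        · simp
        · intro hall
          simp only [List.all_cons, Bool.and_eq_true] at hall
          exact hall.2
      · rw [if_neg hb] at h
        cases hfb : pvFB r0 with
        | none => rw [hfb] at h; simp at h
        | some ar =>
          obtain ⟨a0, r'⟩ := ar
          rw [hfb] at h
          simp only [] at h
          injection h with h'
          injection h' with h1 h2
          subst h1; subst h2
          obtain ⟨hlen, hall⟩ := ih a0 r' hfb
          constructor
          · simp; omega
          · intro hd
            simp only [List.all_cons, Bool.and_eq_true] at hd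
            exact hall hd.2

theorem canon_aux : ∀ (n : ℕ) (l : List Char), l.length ≤ n → l.all pvDomChar = true →
    pvCanonGo l [] [] [] = (pvPipe l).map (List.map String.ofList) := by
  intro n
  induction n with
  | zero =>
    intro l hl hd
    cases l with
    | nil =>
      rw [cg_nil]
      simp [pvPipe, splitlines_eq_go, slgo_nil]
    | cons c r => simp at hl
  | succ n ih =>
    intro l hl hd
    rw [pvMain l hd [] [] [], pipe_decomp l hd]
    cases hfb : pvFB l with
    | none =>
      simp only [List.map_nil]
      have h0 : PySem.Chars.split₀.go l [] [] = PySem.Chars.split₀ l := rfl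
      rw [h0]
      by_cases hsp : PySem.Chars.split₀ l = []
      · simp [pvEmit, pvEmitC, hsp]
      · simp [pvEmit, pvEmitC, hsp]
    | some ar =>
      obtain ⟨a, r⟩ := ar
      obtain ⟨hlt, hall⟩ := pvFB_some l a r hfb
      simp only [List.map_nil]
      have h0 : PySem.Chars.split₀.go a [] [] = PySem.Chars.split₀ a := rfl
      rw [h0, ih r (by omega) (hall hd)]
      by_cases hsp : PySem.Chars.split₀ a = []
      · simp [pvEmit, pvEmitC, hsp]
      · simp [pvEmit, pvEmitC, hsp]

theorem canon_eq_pipe : ∀ l : List Char, l.all pvDomChar = true →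
    pvCanonGo l [] [] [] = (pvPipe l).map (List.map String.ofList) :=
  fun l hd => canon_aux l.length l le_rfl hd

theorem fieldsA_eq (s : String) (_hd : pvDomStr s = true) :
    (((PySem.Str.splitlines s).filter (fun line => PySem.Str.strip line != "")).map
        (fun line => PySem.Str.strip line)).map (fun line => PySem.Str.split₀ line) =
      (pvPipe s.toList).map (List.map String.ofList) := by
  have hsplit : PySem.Str.splitlines s = (PySem.Chars.splitlines s.toList).map String.ofList := by
    rw [← PySem.Str.splitlines_map_toList, List.map_map]
    simp [Function.comp_def]
  have hcond : ∀ x : List Char,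
      (PySem.Str.strip (String.ofList x) != "") = !(PySem.Chars.split₀ x).isEmpty := by
    intro x
    have h := PySem.Str.toList_strip (String.ofList x)
    rw [String.toList_ofList] at h
    by_cases he : PySem.Chars.strip x = []
    · have h0 : PySem.Str.strip (String.ofList x) = "" := by
        apply String.toList_inj.1
        rw [h, he]
        rfl
      have h1 : PySem.Chars.split₀ x = [] :=
        (split₀_eq_nil_iff x).2 ((strip_eq_nil_iff x).1 he)
      simp [h0, h1]
    · have h0 : PySem.Str.strip (String.ofList x) ≠ "" := by
        intro hh
        rw [hh] at h
        exact he (by simpa using h.symm)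
      have h1 : PySem.Chars.split₀ x ≠ [] := fun hh =>
        he ((strip_eq_nil_iff x).2 ((split₀_eq_nil_iff x).1 hh))
      have hb0 : (PySem.Str.strip (String.ofList x) != "") = true := by simp [h0]
      have hb1 : (PySem.Chars.split₀ x).isEmpty = false := by simp [h1]
      rw [hb0, hb1]
      rfl
  have hval : ∀ x : List Char,
      PySem.Str.split₀ (PySem.Str.strip (String.ofList x)) = (PySem.Chars.split₀ x).map String.ofList := by
    intro x
    have h1 := PySem.Str.split₀_map_toList (PySem.Str.strip (String.ofList x))
    rw [PySem.Str.toList_strip, String.toList_ofList, split₀_strip] at h1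
    rw [← h1, List.map_map]
    simp [Function.comp_def]
  rw [hsplit, List.filter_map, List.map_map, List.map_map, pvPipe, List.filter_map, List.map_map]
  have hfil : List.filter ((fun line => PySem.Str.strip line != "") ∘ String.ofList)
      (PySem.Chars.splitlines s.toList) =
      List.filter ((fun t => !t.isEmpty) ∘ PySem.Chars.split₀) (PySem.Chars.splitlines s.toList) :=
    List.filter_congr (fun a _ => by simpa [Function.comp_def] using hcond a)
  rw [hfil]
  apply List.map_congr_left
  intro a ha
  simpa [Function.comp_def] using hval a

-- ===== VERDICT (by name: the statement is the Claim_ definition above) =====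
theorem strings_are_same_just_with_different_whitespaces_spec : Claim_equal_strings_are_same_just_with_different_whitespaces := by
  intro s1 s2 hdom
  unfold Dom_strings_are_same_just_with_different_whitespaces at hdom
  simp only [Bool.and_eq_true] at hdom
  unfold Spec_strings_are_same_just_with_different_whitespaces
  unfold strings_are_same_just_with_different_whitespaces strings_are_same_just_with_different_whitespaces_alt
  simp only []
  rw [fieldsA_eq s1 hdom.1, fieldsA_eq s2 hdom.2]
  unfold pvCanon
  rw [canon_eq_pipe s1.toList (by simpa [pvDomStr] using hdom.1),
      canon_eq_pipe s2.toList (by simpa [pvDomStr] using hdom.2)]
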